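-- pv_equiv track=rewrite | github.com/Michal0ss/WDI | WDI_algo/Zestaw_3/z108.py | find_biggest_sum
-- ===== SOURCE A (Python) =====
-- def find_biggest_sum(t):
--     n = len(t)
--     max_sum = -1
--     best_position = (0,0)
--
--     def get_neighbours(i, j):
--         neighbours = []
--         if i > 0:
--             neighbours.append(t[i - 1][j])  # z góry
--         if i < n - 1:
--             neighbours.append(t[i + 1][j])  # z dołu
--         if j > 0:
--             neighbours.append(t[i][j - 1])  # z lewej
--         if j < n - 1:
--             neighbours.append(t[i][j + 1])  # z prawej
--         return neighbours
--
--     for i in range(n):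
--         for j in range(n):
--             neighbours = get_neighbours(i, j)
--             current_sum = 0
--             for value in neighbours:
--                 current_sum += value
--             if current_sum > max_sum:
--                 max_sum=current_sum
--                 best_position = (i,j)
--
--     return best_position
-- ===== SOURCE B (Python) =====
-- def find_biggest_sum(t):
--     n = len(t)
--     # Phase 1: scatter each value into its neighbours' accumulators.
--     acc = {}
--     for i in range(n):
--         for j in range(n):
--             v = t[i][j]
--             if i > 0:
--                 acc[(i - 1, j)] = acc.get((i - 1, j), 0) + v
--             if i < n - 1:
--                 acc[(i + 1, j)] = acc.get((i + 1, j), 0) + v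
--             if j > 0:
--                 acc[(i, j - 1)] = acc.get((i, j - 1), 0) + v
--             if j < n - 1:
--                 acc[(i, j + 1)] = acc.get((i, j + 1), 0) + v
--     # Phase 2: row-major scan of the accumulated table.
--     max_sum = -1
--     best_position = (0, 0)
--     for i in range(n):
--         for j in range(n):
--             if acc.get((i, j), 0) > max_sum:
--                 max_sum = acc.get((i, j), 0)
--                 best_position = (i, j)
--     return best_position
-- ===== Notes on version B (the rewrite author's own statement) =====
-- stated objective: alternative
-- what changed: Replaces the per-cell gather of the four neighbours with a two-phase scatter: each value is added into its neighbours' accumulators in a dictionary, then a separate row-major scan with the same sentinel and strict '>' picks the first maximal cell. Pre_ excludes ragged inputs whose rows are shorter than the grid height: there A's lazy neighbour gather can still return (only the 1x1 grid with an empty row) or raises, while B's scatter reads t[i][j] itself and raises IndexError.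
-- outside the precondition, e.g. on find_biggest_sum([[]]): A returns (0, 0), B raises IndexError
import Mathlib
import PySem

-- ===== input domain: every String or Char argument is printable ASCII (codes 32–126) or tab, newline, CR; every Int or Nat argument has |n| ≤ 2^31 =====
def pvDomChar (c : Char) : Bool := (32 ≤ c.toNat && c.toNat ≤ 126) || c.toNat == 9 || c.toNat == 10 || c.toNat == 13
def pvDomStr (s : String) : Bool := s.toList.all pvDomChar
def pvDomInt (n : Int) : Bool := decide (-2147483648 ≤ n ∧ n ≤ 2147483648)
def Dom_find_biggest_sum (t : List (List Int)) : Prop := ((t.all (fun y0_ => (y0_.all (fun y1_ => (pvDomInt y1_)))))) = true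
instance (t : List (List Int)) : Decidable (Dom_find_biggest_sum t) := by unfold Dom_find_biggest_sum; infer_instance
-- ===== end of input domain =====

-- B replaces A's per-cell gather of the four neighbours by a scatter-into-a-table pass followed by
-- a separate row-major scan (same sentinel -1, strict '>'); alternative decomposition, same cost.

-- ===== PORT A =====
-- t[i][j], total with default 0 (only in-range accesses are reached inside Pre_)
def pvCell (t : List (List Int)) (i j : Int) : Int :=
  PySem.List.pyGetD (PySem.List.pyGetD t i []) j 0

-- A's helper get_neighbours(i, j)
def pvNeighbours (t : List (List Int)) (n i j : Int) : List Int :=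
  let ns : List Int := []
  let ns := if i > 0 then ns ++ [pvCell t (i - 1) j] else ns
  let ns := if i < n - 1 then ns ++ [pvCell t (i + 1) j] else ns
  let ns := if j > 0 then ns ++ [pvCell t i (j - 1)] else ns
  let ns := if j < n - 1 then ns ++ [pvCell t i (j + 1)] else ns
  ns

def find_biggest_sum (t : List (List Int)) : Int × Int :=
  let n : Int := PySem.List.len t
  let st := (PySem.List.pyRange 0 n 1).foldl (fun st i =>
    (PySem.List.pyRange 0 n 1).foldl (fun st j =>
      let neighbours := pvNeighbours t n i j
      let current_sum := neighbours.foldl (fun acc v => acc + v) 0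
      if current_sum > st.1 then (current_sum, (i, j)) else st) st)
    ((-1 : Int), ((0 : Int), (0 : Int)))
  st.2

-- ===== PORT B =====
-- B's scatter of t[i][j] into the accumulators of its up-to-four neighbours
def pvScatter (t : List (List Int)) (n : Int) (acc : PySem.Dict (Int × Int) Int) (i j : Int) :
    PySem.Dict (Int × Int) Int :=
  let v := pvCell t i j
  let acc := if i > 0 then acc.insert (i - 1, j) (acc.getD (i - 1, j) 0 + v) else acc
  let acc := if i < n - 1 then acc.insert (i + 1, j) (acc.getD (i + 1, j) 0 + v) else acc
  let acc := if j > 0 then acc.insert (i, j - 1) (acc.getD (i, j - 1) 0 + v) else acc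
  if j < n - 1 then acc.insert (i, j + 1) (acc.getD (i, j + 1) 0 + v) else acc

def find_biggest_sum_alt (t : List (List Int)) : Int × Int :=
  let n : Int := PySem.List.len t
  let acc := (PySem.List.pyRange 0 n 1).foldl (fun acc i =>
    (PySem.List.pyRange 0 n 1).foldl (fun acc j => pvScatter t n acc i j) acc)
    (PySem.Dict.empty : PySem.Dict (Int × Int) Int)
  let st := (PySem.List.pyRange 0 n 1).foldl (fun st i =>
    (PySem.List.pyRange 0 n 1).foldl (fun st j =>
      if acc.getD (i, j) 0 > st.1 then (acc.getD (i, j) 0, (i, j)) else st) st)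
    ((-1 : Int), ((0 : Int), (0 : Int)))
  st.2

-- ===== PRECONDITION & SPEC =====
-- Pre_ excludes ragged inputs whose rows are shorter than the grid height: there A's lazy neighbour
-- gather raises IndexError except on the 1x1 grid with an empty row (where a cell has no neighbours
-- and A returns (0,0)), while B's scatter reads t[i][j] itself and raises IndexError.
def Pre_find_biggest_sum (t : List (List Int)) : Prop :=
  ∀ row ∈ t, t.length ≤ row.length
instance (t : List (List Int)) : Decidable (Pre_find_biggest_sum t) := by
  unfold Pre_find_biggest_sum; infer_instance

def pvWitness_find_biggest_sum : List (List Int) := [[1, 2], [3, 4]]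

def Spec_find_biggest_sum (t : List (List Int)) (out : Int × Int) : Prop := out = find_biggest_sum_alt t
instance (t : List (List Int)) (out : Int × Int) : Decidable (Spec_find_biggest_sum t out) := by
  unfold Spec_find_biggest_sum; infer_instance

-- ===== CLAIM (what is proved, stated in full; the proofs are below) =====
def Claim_equal_find_biggest_sum : Prop := ∀ (t : List (List Int)), Dom_find_biggest_sum t → Pre_find_biggest_sum t → Spec_find_biggest_sum t (find_biggest_sum t)

-- ===== LEMMAS AND PROOFS =====

-- closed form of one cell's neighbour sum
def pvGsum (t : List (List Int)) (n i j : Int) : Int :=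
  (if i > 0 then pvCell t (i - 1) j else 0) + (if i < n - 1 then pvCell t (i + 1) j else 0) +
  (if j > 0 then pvCell t i (j - 1) else 0) + (if j < n - 1 then pvCell t i (j + 1) else 0)

-- what one scatter step contributes to target cell (p, q)
def pvContrib (t : List (List Int)) (n i j p q : Int) : Int :=
  (if i > 0 ∧ p = i - 1 ∧ q = j then pvCell t i j else 0) +
  (if i < n - 1 ∧ p = i + 1 ∧ q = j then pvCell t i j else 0) +
  (if j > 0 ∧ p = i ∧ q = j - 1 then pvCell t i j else 0) +
  (if j < n - 1 ∧ p = i ∧ q = j + 1 then pvCell t i j else 0)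

theorem pvNeighbours_sum (t : List (List Int)) (n i j : Int) :
    (pvNeighbours t n i j).foldl (fun acc v => acc + v) 0 = pvGsum t n i j := by
  unfold pvNeighbours pvGsum
  split_ifs <;> simp [List.foldl]

theorem pvCondInsert_getD (d : PySem.Dict (Int × Int) Int) (c : Prop) [Decidable c]
    (a k : Int × Int) (v : Int) :
    ((if c then d.insert a (d.getD a 0 + v) else d).getD k 0)
      = d.getD k 0 + (if c ∧ k = a then v else 0) := by
  by_cases hc : c
  · simp only [if_pos hc, PySem.Dict.getD_insert]
    by_cases hk : k = a
    · subst hk; simp [hc]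
    · simp [hc, hk]
  · simp [hc]

theorem pvScatter_getD (t : List (List Int)) (n : Int) (acc : PySem.Dict (Int × Int) Int)
    (i j p q : Int) :
    (pvScatter t n acc i j).getD (p, q) 0 = acc.getD (p, q) 0 + pvContrib t n i j p q := by
  unfold pvScatter pvContrib
  rw [pvCondInsert_getD, pvCondInsert_getD, pvCondInsert_getD, pvCondInsert_getD]
  simp only [Prod.mk.injEq]
  ring

theorem pvRow_getD (t : List (List Int)) (n : Int) (J : List Int)
    (acc : PySem.Dict (Int × Int) Int) (i p q : Int) :
    (J.foldl (fun acc j => pvScatter t n acc i j) acc).getD (p, q) 0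
      = acc.getD (p, q) 0 + (J.map (fun j => pvContrib t n i j p q)).sum := by
  induction J generalizing acc with
  | nil => simp
  | cons j J ih => simp [List.foldl, ih, pvScatter_getD]; ring

theorem pvGrid_getD (t : List (List Int)) (n : Int) (I J : List Int)
    (acc : PySem.Dict (Int × Int) Int) (p q : Int) :
    (I.foldl (fun acc i => J.foldl (fun acc j => pvScatter t n acc i j) acc) acc).getD (p, q) 0
      = acc.getD (p, q) 0
        + (I.map (fun i => (J.map (fun j => pvContrib t n i j p q)).sum)).sum := by
  induction I generalizing acc with
  | nil => simp
  | cons i I ih => simp [List.foldl, ih, pvRow_getD]; ring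

theorem pvSum_indicator (n a : Int) (f : Int → Int) :
    (((PySem.List.pyRange 0 n 1).map (fun x => if x = a then f x else 0)).sum)
      = if 0 ≤ a ∧ a < n then f a else 0 := by
  by_cases h : 0 ≤ a ∧ a < n
  · rw [PySem.List.pyRange_one_append 0 a n h.1 (by omega),
      PySem.List.pyRange_one_cons h.2, if_pos h]
    rw [List.map_append, List.sum_append, List.map_cons, List.sum_cons]
    have h1 : ((PySem.List.pyRange 0 a 1).map (fun x => if x = a then f x else 0)).sum = 0 := by
      apply List.sum_eq_zero
      intro x hx
      obtain ⟨y, hy, rfl⟩ := List.mem_map.mp hx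
      rw [PySem.List.mem_pyRange_one] at hy
      rw [if_neg (by omega)]
    have h2 : ((PySem.List.pyRange (a + 1) n 1).map (fun x => if x = a then f x else 0)).sum = 0 := by
      apply List.sum_eq_zero
      intro x hx
      obtain ⟨y, hy, rfl⟩ := List.mem_map.mp hx
      rw [PySem.List.mem_pyRange_one] at hy
      rw [if_neg (by omega)]
    rw [h1, h2, if_pos rfl]
    ring
  · rw [if_neg h]
    apply List.sum_eq_zero
    intro x hx
    obtain ⟨y, hy, rfl⟩ := List.mem_map.mp hx
    rw [PySem.List.mem_pyRange_one] at hy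
    rw [if_neg (by omega)]

theorem pvSum2_indicator (n a b : Int) (f : Int → Int → Int) :
    ((PySem.List.pyRange 0 n 1).map (fun i =>
        ((PySem.List.pyRange 0 n 1).map (fun j => if i = a ∧ j = b then f i j else 0)).sum)).sum
      = if (0 ≤ a ∧ a < n) ∧ (0 ≤ b ∧ b < n) then f a b else 0 := by
  have inner : ∀ i : Int,
      ((PySem.List.pyRange 0 n 1).map (fun j => if i = a ∧ j = b then f i j else 0)).sum
        = if 0 ≤ b ∧ b < n then (if i = a then f i b else 0) else 0 := by
    intro i
    have : (fun j => if i = a ∧ j = b then f i j else 0)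
        = (fun j => if j = b then (if i = a then f i j else 0) else 0) := by
      funext j; split_ifs <;> simp_all
    rw [this, pvSum_indicator]
  simp only [inner]
  by_cases hb : 0 ≤ b ∧ b < n
  · simp only [if_pos hb, pvSum_indicator n a (fun i => f i b)]
    by_cases ha : 0 ≤ a ∧ a < n
    · rw [if_pos ha, if_pos ⟨ha, hb⟩]
    · rw [if_neg ha, if_neg (fun h => ha h.1)]
  · simp only [if_neg hb]
    rw [if_neg (fun h : (0 ≤ a ∧ a < n) ∧ (0 ≤ b ∧ b < n) => hb h.2)]
    simp

-- the accumulated table holds exactly the neighbour sums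
theorem pvAcc_eq_gsum (t : List (List Int)) (n p q : Int)
    (hp : 0 ≤ p ∧ p < n) (hq : 0 ≤ q ∧ q < n) :
    (((PySem.List.pyRange 0 n 1).foldl (fun acc i =>
        (PySem.List.pyRange 0 n 1).foldl (fun acc j => pvScatter t n acc i j) acc)
        (PySem.Dict.empty : PySem.Dict (Int × Int) Int)).getD (p, q) 0)
      = pvGsum t n p q := by
  rw [pvGrid_getD, PySem.Dict.getD_empty, zero_add]
  have hc : ∀ i j : Int, pvContrib t n i j p q
      = ((if i = p + 1 ∧ j = q then pvCell t i j else 0)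
          + (if i = p - 1 ∧ j = q then pvCell t i j else 0))
        + ((if i = p ∧ j = q + 1 then pvCell t i j else 0)
          + (if i = p ∧ j = q - 1 then pvCell t i j else 0)) := by
    intro i j
    unfold pvContrib
    have e1 : (i > 0 ∧ p = i - 1 ∧ q = j) ↔ (i = p + 1 ∧ j = q) := by omega
    have e2 : (i < n - 1 ∧ p = i + 1 ∧ q = j) ↔ (i = p - 1 ∧ j = q) := by omega
    have e3 : (j > 0 ∧ p = i ∧ q = j - 1) ↔ (i = p ∧ j = q + 1) := by omega
    have e4 : (j < n - 1 ∧ p = i ∧ q = j + 1) ↔ (i = p ∧ j = q - 1) := by omega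
    rw [if_congr e1 rfl rfl, if_congr e2 rfl rfl, if_congr e3 rfl rfl, if_congr e4 rfl rfl]
    ring
  simp only [hc]
  simp only [PySem.List.sum_map_add_int]
  rw [pvSum2_indicator, pvSum2_indicator, pvSum2_indicator, pvSum2_indicator]
  unfold pvGsum
  have g1 : (if (0 ≤ p + 1 ∧ p + 1 < n) ∧ 0 ≤ q ∧ q < n then pvCell t (p + 1) q else 0)
      = (if p < n - 1 then pvCell t (p + 1) q else 0) := by
    split_ifs <;> first | rfl | omega
  have g2 : (if (0 ≤ p - 1 ∧ p - 1 < n) ∧ 0 ≤ q ∧ q < n then pvCell t (p - 1) q else 0)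
      = (if p > 0 then pvCell t (p - 1) q else 0) := by
    split_ifs <;> first | rfl | omega
  have g3 : (if (0 ≤ p ∧ p < n) ∧ 0 ≤ q + 1 ∧ q + 1 < n then pvCell t p (q + 1) else 0)
      = (if q < n - 1 then pvCell t p (q + 1) else 0) := by
    split_ifs <;> first | rfl | omega
  have g4 : (if (0 ≤ p ∧ p < n) ∧ 0 ≤ q - 1 ∧ q - 1 < n then pvCell t p (q - 1) else 0)
      = (if q > 0 then pvCell t p (q - 1) else 0) := by
    split_ifs <;> first | rfl | omega
  rw [g1, g2, g3, g4]
  ring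

-- ===== VERDICT (by name: the statement is the Claim_ definition above) =====
theorem find_biggest_sum_spec : Claim_equal_find_biggest_sum := by
  intro t _ _
  unfold Spec_find_biggest_sum find_biggest_sum find_biggest_sum_alt
  simp only []
  apply congrArg Prod.snd
  apply PySem.List.foldl_congr_mem
  intro st i hi
  apply PySem.List.foldl_congr_mem
  intro st' j hj
  rw [PySem.List.mem_pyRange_one] at hi hj
  have hA := pvNeighbours_sum t (PySem.List.len t) i j
  have hB := pvAcc_eq_gsum t (PySem.List.len t) i j hi hj
  simp only [hA, hB]
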